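-- pv_equiv track=rewrite | github.com/leonardlux/MasterArbeit | code/from_luis/fermion/fermion/error_prop_tori_code_bit_flip.py | stabilizer_string
-- ===== SOURCE A (Python) =====
-- def stabilizer_string(list_indices,x_stab,N):
--
--     if x_stab==True: Pauli="X"
--     else: Pauli="Z"
--
--     string_pauli = ""
--     for x in range(N):
--         if x in list_indices: string_pauli += Pauli
--         else: string_pauli += "I"
--
--     return string_pauli
-- ===== SOURCE B (Python) =====
-- def stabilizer_string(list_indices, x_stab, N):
--     Pauli = "X" if x_stab == True else "Z"
--     chars = ["I"] * N
--     for i in list_indices: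
--         if 0 <= i < N:
--             chars[i] = Pauli
--     return "".join(chars)
-- ===== Notes on version B (the rewrite author's own statement) =====
-- stated objective: faster
-- what changed: Scatter instead of gather: B fills a length-N buffer of 'I' and writes the Pauli letter only at the in-range marked indices, instead of scanning all N positions with an O(len(list_indices)) membership test each.
import Mathlib
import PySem

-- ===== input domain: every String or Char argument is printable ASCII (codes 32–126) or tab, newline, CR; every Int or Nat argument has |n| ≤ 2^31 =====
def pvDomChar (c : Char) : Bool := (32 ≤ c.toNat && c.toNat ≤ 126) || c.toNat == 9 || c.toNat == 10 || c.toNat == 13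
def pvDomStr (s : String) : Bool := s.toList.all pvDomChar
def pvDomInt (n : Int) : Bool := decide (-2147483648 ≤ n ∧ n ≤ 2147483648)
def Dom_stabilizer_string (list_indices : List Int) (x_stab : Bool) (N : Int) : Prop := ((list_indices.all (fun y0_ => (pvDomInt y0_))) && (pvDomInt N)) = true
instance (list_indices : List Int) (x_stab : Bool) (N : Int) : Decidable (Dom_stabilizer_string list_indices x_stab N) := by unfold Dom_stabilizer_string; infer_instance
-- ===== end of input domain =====

-- B builds the string by scatter (a length-N buffer of 'I' with the Pauli letter written at the
-- in-range marked indices) instead of A's gather (scan of all N positions with a membership test).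

-- ===== PORT A =====
-- literal port of A: strings handled as List Char (String.ofList at the end); '+=' is list append
def stabilizer_string (list_indices : List Int) (x_stab : Bool) (N : Int) : String :=
  let Pauli : List Char := if x_stab = true then ['X'] else ['Z']
  let string_pauli : List Char :=
    (PySem.List.pyRange 0 N 1).foldl
      (fun s x => if x ∈ list_indices then s ++ Pauli else s ++ ['I']) []
  String.ofList string_pauli

-- ===== PORT B =====
-- literal port of Source B: chars = ['I'] * N; in-range writes chars[i] = Pauli; ''.join(chars)
def stabilizer_string_alt (list_indices : List Int) (x_stab : Bool) (N : Int) : String :=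
  let p : Char := if x_stab = true then 'X' else 'Z'
  let chars : List Char := List.replicate N.toNat 'I'
  String.ofList
    (list_indices.foldl
      (fun c i => if 0 ≤ i ∧ i < N then c.set i.toNat p else c) chars)

-- ===== PRECONDITION & SPEC =====
def Spec_stabilizer_string (list_indices : List Int) (x_stab : Bool) (N : Int) (out : String) : Prop := out = stabilizer_string_alt list_indices x_stab N
instance (list_indices : List Int) (x_stab : Bool) (N : Int) (out : String) : Decidable (Spec_stabilizer_string list_indices x_stab N out) := by unfold Spec_stabilizer_string; infer_instance

-- ===== CLAIM (what is proved, stated in full; the proofs are below) =====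
def Claim_equal_stabilizer_string : Prop := ∀ (list_indices : List Int) (x_stab : Bool) (N : Int), Dom_stabilizer_string list_indices x_stab N → Spec_stabilizer_string list_indices x_stab N (stabilizer_string list_indices x_stab N)

-- ===== LEMMAS AND PROOFS =====

-- B's scatter loop preserves the buffer length
lemma setloop_length (p : Char) (N : Int) (l : List Int) (c : List Char) :
    (l.foldl (fun c i => if 0 ≤ i ∧ i < N then c.set i.toNat p else c) c).length = c.length := by
  induction l generalizing c with
  | nil => rfl
  | cons i t ih =>
      simp only [List.foldl_cons]
      rw [ih]
      split_ifs <;> simp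

-- pointwise characterisation of B's scatter loop
lemma setloop_getD (p : Char) (N : Int) (l : List Int) (c : List Char) (j : Nat) (d : Char)
    (hj : j < c.length) :
    (l.foldl (fun c i => if 0 ≤ i ∧ i < N then c.set i.toNat p else c) c).getD j d
      = if ((j : Int) ∈ l ∧ (j : Int) < N) then p else c.getD j d := by
  induction l generalizing c with
  | nil => simp
  | cons i t ih =>
      simp only [List.foldl_cons]
      have hlen : (if 0 ≤ i ∧ i < N then c.set i.toNat p else c).length = c.length := by
        split_ifs <;> simp
      rw [ih _ (by rw [hlen]; exact hj)]
      by_cases hmem : (j : Int) ∈ t ∧ (j : Int) < N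
      · rw [if_pos hmem, if_pos (And.intro (List.mem_cons_of_mem _ hmem.1) hmem.2)]
      · rw [if_neg hmem]
        by_cases hi : i = (j : Int) ∧ (j : Int) < N
        · have hg : 0 ≤ i ∧ i < N := ⟨hi.1 ▸ Int.natCast_nonneg j, hi.1 ▸ hi.2⟩
          rw [if_pos hg]
          have hij : i.toNat = j := by omega
          rw [if_pos (And.intro (hi.1 ▸ List.mem_cons_self) hi.2)]
          simp [hij, List.getD_eq_getElem?_getD, hj]
        · have hcond : ¬ ((j : Int) ∈ i :: t ∧ (j : Int) < N) := by
            rintro ⟨hm, hlt⟩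
            rcases List.mem_cons.mp hm with h | h
            · exact hi ⟨h.symm, hlt⟩
            · exact hmem ⟨h, hlt⟩
          rw [if_neg hcond]
          split_ifs with hg
          · have hne : i.toNat ≠ j := by
              intro h
              exact hi ⟨by omega, by omega⟩
            simp [List.getD_eq_getElem?_getD, hne]
          · rfl

-- ===== VERDICT (by name: the statement is the Claim_ definition above) =====
theorem stabilizer_string_spec : Claim_equal_stabilizer_string := by
  intro l x N _
  show _ = _
  unfold stabilizer_string stabilizer_string_alt
  simp only []
  congr 1
  -- A's loop as a map over the index range
  rw [show (fun (s : List Char) (x' : Int) =>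
        if x' ∈ l then s ++ (if x = true then ['X'] else ['Z']) else s ++ ['I'])
      = (fun (s : List Char) (x' : Int) =>
        s ++ [if x' ∈ l then (if x = true then 'X' else 'Z') else 'I']) from by
        funext s x'; split_ifs <;> rfl]
  rw [PySem.List.foldl_append_singleton_eq_map, List.nil_append, PySem.List.pyRange_one]
  apply List.ext_getElem
  · rw [setloop_length]
    simp
  · intro k h1 h2
    have hk : k < N.toNat := by simpa using h1
    rw [← List.getD_eq_getElem _ 'I' h2,
       setloop_getD _ _ _ _ _ _ (by simpa using hk)]
    have hkN : (k : Int) < N := by omega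
    simp only [List.getElem_map, List.getElem_range, Int.sub_zero] at *
    have : (0 : Int) + (k : Int) = (k : Int) := by ring
    rw [this]
    by_cases hm : (k : Int) ∈ l
    · rw [if_pos hm, if_pos (And.intro hm hkN)]
    · rw [if_neg hm, if_neg (by rintro ⟨h, _⟩; exact hm h)]
      simp
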